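-- pv_equiv track=rewrite | github.com/Janek21/Bioinfo_share_2Y_2T | Bruno/ASAB/programs/week_3/score_seqs_gap.py | score_seqs
-- ===== SOURCE A (Python) =====
-- def score_seqs(seq1, seq2, match, mismatch, gap):
--   '''
--   >>> score_seqs("THEFASTCAT", "THEFATCAT-", 1, -1, -2)
--   -1
--   >>> score_seqs("THEFASTCAT", "THEFATCA-T", 1, -1, -2)
--   1
--   >>> score_seqs("THEFA-TCAT", "THEFASTCAT", 1, -1, -2)
--   7
--   >>> score_seqs("THEFASTCAT", "THE", 1, -1, -2)
--   0
--   >>> score_seqs("THE-FASTCAT", "THE-FASTCAT", 1, -1, -2)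
--   8
--   '''
--   if len(seq1) != len(seq2):
--     return 0
--   else:
--     counter = 0
--     for i in range(len(seq1)):
--       if seq1[i] == '-' or seq2[i] == '-':
--         counter += gap
--       elif seq1[i] == seq2[i]:
--         counter += match
--       else:
--         counter += mismatch
--     return counter
-- ===== SOURCE B (Python) =====
-- def score_seqs(seq1, seq2, match, mismatch, gap):
--     if len(seq1) != len(seq2):
--         return 0
--     pairs = list(zip(seq1, seq2))
--     gaps = sum(1 for a, b in pairs if a == '-' or b == '-')
--     matches = sum(1 for a, b in pairs if a == b and a != '-')
--     mismatches = len(seq1) - gaps - matches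
--     return match * matches + mismatch * mismatches + gap * gaps
-- ===== Notes on version B (the rewrite author's own statement) =====
-- stated objective: alternative
-- what changed: Replaced A's fused per-position score accumulator with counting the gap and match categories over the zipped character pairs once and returning a single closed-form linear combination match*matches + mismatch*(n-gaps-matches) + gap*gaps.
import Mathlib
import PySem

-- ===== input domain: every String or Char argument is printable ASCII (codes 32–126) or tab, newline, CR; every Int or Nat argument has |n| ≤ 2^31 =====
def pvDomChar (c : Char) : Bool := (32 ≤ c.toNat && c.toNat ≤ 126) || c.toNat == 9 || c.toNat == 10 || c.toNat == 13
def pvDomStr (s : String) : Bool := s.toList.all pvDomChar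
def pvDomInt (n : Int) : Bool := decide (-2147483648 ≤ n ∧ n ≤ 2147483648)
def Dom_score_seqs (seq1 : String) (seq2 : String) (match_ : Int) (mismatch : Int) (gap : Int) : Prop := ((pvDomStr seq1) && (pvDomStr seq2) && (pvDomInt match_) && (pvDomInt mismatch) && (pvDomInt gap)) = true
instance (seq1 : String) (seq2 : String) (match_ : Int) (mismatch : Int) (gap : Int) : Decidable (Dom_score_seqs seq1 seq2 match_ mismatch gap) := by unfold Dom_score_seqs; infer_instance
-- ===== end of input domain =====

-- B replaces A's fused per-position accumulator by counting the gap/match categories over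
-- the zipped pairs and returning one closed-form linear combination (objective: alternative).

-- ===== PORT A =====
-- literal port of A: guard on unequal lengths, then one indexed loop with a running counter
def score_seqs (seq1 : String) (seq2 : String) (match_ : Int) (mismatch : Int) (gap : Int) : Int :=
  let l1 := seq1.toList
  let l2 := seq2.toList
  if l1.length ≠ l2.length then 0
  else
    (PySem.List.pyRange 0 (l1.length : Int) 1).foldl (fun counter i =>
      if PySem.List.pyGetD l1 i ' ' = '-' ∨ PySem.List.pyGetD l2 i ' ' = '-' then counter + gap
      else if PySem.List.pyGetD l1 i ' ' = PySem.List.pyGetD l2 i ' ' then counter + match_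
      else counter + mismatch) 0

-- ===== PORT B =====
-- literal port of B: zip, count gap positions and match positions, closed-form combination
def score_seqs_alt (seq1 : String) (seq2 : String) (match_ : Int) (mismatch : Int) (gap : Int) : Int :=
  let l1 := seq1.toList
  let l2 := seq2.toList
  if l1.length ≠ l2.length then 0
  else
    let pairs := l1.zip l2
    let gaps : Int := pairs.countP (fun p => p.1 == '-' || p.2 == '-')
    let matchesN : Int := pairs.countP (fun p => p.1 == p.2 && p.1 != '-')
    let mismatchesN : Int := (l1.length : Int) - gaps - matchesN
    match_ * matchesN + mismatch * mismatchesN + gap * gaps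

-- ===== PRECONDITION & SPEC =====
def Spec_score_seqs (seq1 : String) (seq2 : String) (match_ : Int) (mismatch : Int) (gap : Int) (out : Int) : Prop := out = score_seqs_alt seq1 seq2 match_ mismatch gap
instance (seq1 : String) (seq2 : String) (match_ : Int) (mismatch : Int) (gap : Int) (out : Int) : Decidable (Spec_score_seqs seq1 seq2 match_ mismatch gap out) := by unfold Spec_score_seqs; infer_instance

-- ===== CLAIM (what is proved, stated in full; the proofs are below) =====
def Claim_equal_score_seqs : Prop := ∀ (seq1 : String) (seq2 : String) (match_ : Int) (mismatch : Int) (gap : Int), Dom_score_seqs seq1 seq2 match_ mismatch gap → Spec_score_seqs seq1 seq2 match_ mismatch gap (score_seqs seq1 seq2 match_ mismatch gap)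

-- ===== LEMMAS AND PROOFS =====

-- A's loop over the zipped pairs equals B's linear combination of category counts.
theorem loop_eq_counts (match_ mismatch gap : Int) :
    ∀ (ps : List (Char × Char)) (acc : Int),
      ps.foldl (fun counter p =>
          if p.1 = '-' ∨ p.2 = '-' then counter + gap
          else if p.1 = p.2 then counter + match_
          else counter + mismatch) acc
        = acc + match_ * (ps.countP (fun p => p.1 == '-' || p.2 == '-') : Int) * 0
            + match_ * (ps.countP (fun p => p.1 == p.2 && p.1 != '-') : Int)
            + mismatch * ((ps.length : Int)
                - (ps.countP (fun p => p.1 == '-' || p.2 == '-') : Int)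
                - (ps.countP (fun p => p.1 == p.2 && p.1 != '-') : Int))
            + gap * (ps.countP (fun p => p.1 == '-' || p.2 == '-') : Int) := by
  intro ps
  induction ps with
  | nil => intro acc; simp
  | cons p ps ih =>
    intro acc
    simp only [List.foldl_cons, List.countP_cons, List.length_cons, ih]
    by_cases hg : p.1 = '-' ∨ p.2 = '-'
    · have hgb : (p.1 == '-' || p.2 == '-') = true := by
        rcases hg with h | h <;> simp [h]
      have hmb : (p.1 == p.2 && p.1 != '-') = false := by
        rcases hg with h | h
        · simp [h]
        · by_cases he : p.1 = p.2 <;> simp [he, h]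
      rw [if_pos hg, hgb, hmb]
      push_cast
      norm_num
      try ring
    · push_neg at hg
      obtain ⟨h1, h2⟩ := hg
      have hgb : (p.1 == '-' || p.2 == '-') = false := by simp [h1, h2]
      rw [if_neg (by tauto), hgb]
      by_cases he : p.1 = p.2
      · have hmb : (p.1 == p.2 && p.1 != '-') = true := by
          simp only [he, beq_self_eq_true, Bool.true_and, bne_iff_ne, ne_eq, decide_eq_true_eq]
          exact he ▸ h1
        rw [if_pos he, hmb]
        push_cast
        norm_num
        try ring
      · have hmb : (p.1 == p.2 && p.1 != '-') = false := by simp [he]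
        rw [if_neg he, hmb]
        push_cast
        norm_num
        try ring

theorem score_seqs_spec : Claim_equal_score_seqs := by
  intro seq1 seq2 match_ mismatch gap _
  unfold Spec_score_seqs score_seqs score_seqs_alt
  set l1 := seq1.toList with hl1
  set l2 := seq2.toList with hl2
  by_cases hlen : l1.length ≠ l2.length
  · simp [hlen]
  · push_neg at hlen
    rw [if_neg (by simp [hlen]), if_neg (by simp [hlen])]
    have hz : (l1.zip l2).length = l1.length := by
      simp [List.length_zip, hlen]
    -- rewrite A's indexed loop into a loop over the zipped pairs
    have hstep :
        (PySem.List.pyRange 0 (l1.length : Int) 1).foldl (fun counter i =>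
            if PySem.List.pyGetD l1 i ' ' = '-' ∨ PySem.List.pyGetD l2 i ' ' = '-' then counter + gap
            else if PySem.List.pyGetD l1 i ' ' = PySem.List.pyGetD l2 i ' ' then counter + match_
            else counter + mismatch) 0
          = (PySem.List.pyRange 0 ((l1.zip l2).length : Int) 1).foldl (fun counter i =>
              (fun counter (p : Char × Char) =>
                if p.1 = '-' ∨ p.2 = '-' then counter + gap
                else if p.1 = p.2 then counter + match_
                else counter + mismatch) counter (PySem.List.pyGetD (l1.zip l2) i (' ', ' '))) 0 := by
      rw [hz]
      apply PySem.List.foldl_congr_mem'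
      intro i hi acc
      have hib := PySem.List.mem_pyRange_one.mp hi
      have h1 := PySem.List.pyGetD_eq_getElem l1 ' ' hib.1 hib.2
      have h2 := PySem.List.pyGetD_eq_getElem l2 ' ' hib.1 (by rw [← hlen]; exact hib.2)
      have h3 := PySem.List.pyGetD_eq_getElem (l1.zip l2) (' ', ' ') hib.1 (by rw [hz]; exact hib.2)
      rw [h1, h2, h3]
      simp [List.getElem_zip]
    rw [hstep, PySem.List.foldl_pyRange_zero_pyGetD' (l1.zip l2) (' ', ' ')
      (fun counter p =>
        if p.1 = '-' ∨ p.2 = '-' then counter + gap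
        else if p.1 = p.2 then counter + match_
        else counter + mismatch) 0, loop_eq_counts]
    simp only [hz]
    ring
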